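-- pv_equiv track=rewrite | github.com/alexanderlunova/plugin_hybrid_vehicle | helper_functions.py | find_special_days
-- ===== SOURCE A (Python) =====
-- def find_special_days(df):
--     num_bins = 365
--     days = []
--     for i in range(num_bins):
--         start = i * 96
--         end = (i + 1) * 96
--         bin_data = sum(df[start:end])
--         if (bin_data > 300):
--             days.append(i)
--
--     return days
-- ===== SOURCE B (Python) =====
-- def find_special_days(df):
--     limit = 365 * 96
--     pre = [0]
--     acc = 0
--     for x in df[:limit]:
--         acc += x
--         pre.append(acc)
--     m = len(pre) - 1
--     days = []
--     for i in range(365):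
--         s = min(i * 96, m)
--         e = min((i + 1) * 96, m)
--         if pre[e] - pre[s] > 300:
--             days.append(i)
--     return days
-- ===== Notes on version B (the rewrite author's own statement) =====
-- stated objective: alternative
-- what changed: Replaces 365 independent slice-and-sum scans with one prefix-sum table over the first 365*96 elements followed by constant-time differencing per bin.
import Mathlib
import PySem

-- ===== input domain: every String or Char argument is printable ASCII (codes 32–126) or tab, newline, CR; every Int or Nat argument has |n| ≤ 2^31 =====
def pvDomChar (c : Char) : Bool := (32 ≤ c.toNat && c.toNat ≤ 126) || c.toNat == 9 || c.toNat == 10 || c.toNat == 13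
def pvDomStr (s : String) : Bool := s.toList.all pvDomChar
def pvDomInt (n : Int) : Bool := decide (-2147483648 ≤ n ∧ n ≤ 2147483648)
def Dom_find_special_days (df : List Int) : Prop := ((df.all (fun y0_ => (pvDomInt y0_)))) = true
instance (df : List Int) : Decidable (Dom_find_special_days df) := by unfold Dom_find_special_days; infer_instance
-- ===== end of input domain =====

-- B replaces A's 365 independent slice-and-sum passes by one prefix-sum table over the
-- first 365*96 elements plus constant-time differencing per bin (alternative decomposition).


-- ===== PORT A =====
def find_special_days (df : List Int) : List Int :=
  (PySem.List.pyRange 0 365 1).foldl (fun days i =>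
    let start := i * 96
    let stop := (i + 1) * 96
    let bin_data := (PySem.List.slice df (some start) (some stop)).sum
    if bin_data > 300 then days ++ [i] else days) []

-- ===== PORT B =====
def find_special_days_alt (df : List Int) : List Int :=
  let limit : Int := 365 * 96
  let st := (PySem.List.slice df none (some limit)).foldl
      (fun (st : List Int × Int) x => (st.1 ++ [st.2 + x], st.2 + x)) ([0], 0)
  let pre := st.1
  let m : Int := (pre.length : Int) - 1
  (PySem.List.pyRange 0 365 1).foldl (fun days i =>
    let s := min (i * 96) m
    let e := min ((i + 1) * 96) m
    if PySem.List.pyGetD pre e 0 - PySem.List.pyGetD pre s 0 > 300 then days ++ [i] else days) []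

-- ===== PRECONDITION & SPEC =====
def Spec_find_special_days (df : List Int) (out : List Int) : Prop := out = find_special_days_alt df
instance (df : List Int) (out : List Int) : Decidable (Spec_find_special_days df out) := by unfold Spec_find_special_days; infer_instance

-- ===== CLAIM (what is proved, stated in full; the proofs are below) =====
def Claim_equal_find_special_days : Prop := ∀ (df : List Int), Dom_find_special_days df → Spec_find_special_days df (find_special_days df)

-- ===== LEMMAS AND PROOFS =====

-- B's prefix-building fold, characterised: it appends the running partial sums.
theorem pv_fold_pre (l : List Int) (p0 : List Int) (a0 : Int) :
    l.foldl (fun (st : List Int × Int) x => (st.1 ++ [st.2 + x], st.2 + x)) (p0, a0)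
      = (p0 ++ (List.range l.length).map (fun k => a0 + (l.take (k+1)).sum), a0 + l.sum) := by
  induction l generalizing p0 a0 with
  | nil => simp
  | cons x xs ih =>
    simp only [List.foldl_cons, ih, List.length_cons, List.range_succ_eq_map]
    simp [List.append_assoc, Function.comp, add_assoc]

-- The prefix list equals the map of take-sums over range (n+1).
theorem pv_pre_eq (l : List Int) :
    (l.foldl (fun (st : List Int × Int) x => (st.1 ++ [st.2 + x], st.2 + x)) ([0], 0)).1
      = (List.range (l.length + 1)).map (fun k => (l.take k).sum) := by
  rw [pv_fold_pre]
  rw [List.range_succ_eq_map]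
  simp [Function.comp]

-- sum of a contiguous chunk as a difference of take-sums
theorem pv_chunk_sum (l : List Int) (a b : Nat) (hab : a ≤ b) :
    ((l.drop a).take (b - a)).sum = (l.take b).sum - (l.take a).sum := by
  have : b = a + (b - a) := by omega
  rw [this, List.take_add]
  simp

-- ===== VERDICT (by name: the statement is the Claim_ definition above) =====

theorem find_special_days_spec : Claim_equal_find_special_days := by
  intro df _
  unfold Spec_find_special_days find_special_days find_special_days_alt
  simp only []
  set l : List Int := PySem.List.slice df none (some (365 * 96)) with hl
  have hl' : l = df.take 35040 := by
    rw [hl, PySem.List.slice_to df (by norm_num : (0:Int) ≤ 365 * 96)]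
    rfl
  set n : Nat := l.length with hn
  have hpre : (l.foldl (fun (st : List Int × Int) x => (st.1 ++ [st.2 + x], st.2 + x)) ([0], 0)).1
      = (List.range (n + 1)).map (fun k => (l.take k).sum) := pv_pre_eq l
  rw [hpre]
  have hlen : ((List.range (n + 1)).map (fun k => (l.take k).sum)).length = n + 1 := by simp
  rw [hlen]
  apply PySem.List.foldl_congr_mem
  intro days i hi
  rw [PySem.List.mem_pyRange_one] at hi
  obtain ⟨h0, h365⟩ := hi
  have hm : ((n : Int) + 1 - 1) = (n : Int) := by ring
  push_cast
  rw [hm]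
  -- the two clamped indices
  have hnl : n ≤ 35040 := by
    rw [hn, hl']; simp
  have hsle : (0:Int) ≤ min (i * 96) n := le_min (by nlinarith) (by positivity)
  have hele : (0:Int) ≤ min ((i + 1) * 96) n := le_min (by nlinarith) (by positivity)
  have hslt : min (i * 96) (n:Int) < (n:Int) + 1 := lt_of_le_of_lt (min_le_right _ _) (by omega)
  have helt : min ((i + 1) * 96) (n:Int) < (n:Int) + 1 := lt_of_le_of_lt (min_le_right _ _) (by omega)
  rw [PySem.List.pyGetD_eq_getElem _ 0 hele (by simp),
      PySem.List.pyGetD_eq_getElem _ 0 hsle (by simp)]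
  -- indices as Nats
  have hi96 : (0:Int) ≤ i * 96 := by nlinarith
  have hi96' : (0:Int) ≤ (i + 1) * 96 := by nlinarith
  have hsN : (min (i * 96) (n:Int)).toNat = min (i * 96).toNat n := by omega
  have heN : (min ((i + 1) * 96) (n:Int)).toNat = min ((i + 1) * 96).toNat n := by omega
  simp only [List.getElem_map, List.getElem_range, hsN, heN]
  -- slice of A as drop/take
  rw [PySem.List.slice_toNat df hi96 hi96']
  have hab : (i * 96).toNat ≤ ((i + 1) * 96).toNat := by omega
  rw [pv_chunk_sum df _ _ hab]
  -- take through the limit window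
  have htake : ∀ k : Nat, k ≤ 35040 → (df.take k).sum = (l.take (min k n)).sum := by
    intro k hk
    have h1 : l.take (min k n) = l.take k := by
      rw [hn, ← List.take_length (l := l), List.take_take, List.take_take]
      simp
    rw [h1, hl', List.take_take, Nat.min_eq_left hk]
  have hbb : ((i + 1) * 96).toNat ≤ 35040 := by omega
  have haa : (i * 96).toNat ≤ 35040 := by omega
  rw [htake _ hbb, htake _ haa]
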